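-- pv_equiv track=rewrite | github.com/git-siddhesh/CRF_model_ner | data_loader.py | get_word_pattern
-- ===== SOURCE A (Python) =====
-- def get_word_pattern(word: str) -> str:
--     """Get word pattern (e.g., 'John-2' -> 'Aa-N')"""
--     pattern = ''
--     for i, char in enumerate(word):
--         if char.isupper():
--             pattern += 'A' if i == 0 else 'a'
--         elif char.islower():
--             pattern += 'a'
--         elif char.isdigit():
--             pattern += 'N'
--         else:
--             pattern += char
--     return pattern
-- ===== SOURCE B (Python) =====
-- # Precomputed translation table: classification is a single table lookup via
-- # str.translate instead of predicate branches per character; the first-letter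
-- # capitalisation is a separate O(1) fix-up.
-- _PAT_TABLE = str.maketrans(
--     "abcdefghijklmnopqrstuvwxyzABCDEFGHIJKLMNOPQRSTUVWXYZ0123456789",
--     "a" * 52 + "N" * 10,
-- )
--
--
-- def get_word_pattern(word: str) -> str:
--     body = word.translate(_PAT_TABLE)
--     if word[:1].isupper():
--         body = 'A' + body[1:]
--     return body
-- ===== Notes on version B (the rewrite author's own statement) =====
-- stated objective: faster
-- what changed: B replaces A's per-character predicate branch chain with a precomputed str.maketrans translation table applied in one str.translate call (then an O(1) leading-capital fix-up): classification becomes a data-driven table lookup in C instead of Python-level control flow per character.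
import Mathlib
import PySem

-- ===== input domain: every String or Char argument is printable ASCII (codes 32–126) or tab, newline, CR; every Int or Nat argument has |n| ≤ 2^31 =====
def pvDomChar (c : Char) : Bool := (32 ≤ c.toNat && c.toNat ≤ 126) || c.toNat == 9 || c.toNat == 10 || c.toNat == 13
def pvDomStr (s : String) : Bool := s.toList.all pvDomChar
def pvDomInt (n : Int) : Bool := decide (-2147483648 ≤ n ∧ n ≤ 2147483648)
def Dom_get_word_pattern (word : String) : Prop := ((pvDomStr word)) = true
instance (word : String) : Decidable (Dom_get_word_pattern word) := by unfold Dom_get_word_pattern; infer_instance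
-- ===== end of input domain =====

-- B classifies via a precomputed str.maketrans translation table (one str.translate pass) plus an O(1) leading-capital fix-up, instead of A's per-character predicate branches; measurably faster by constant factor (C-level translate).


-- ===== PORT A =====
def pvStepA (pat : List Char) (p : Int × Char) : List Char :=
  if PySem.Chars.isupper p.2 then pat ++ (if p.1 = 0 then ['A'] else ['a'])
  else if PySem.Chars.islower p.2 then pat ++ ['a']
  else if PySem.Chars.isdigit p.2 then pat ++ ['N']
  else pat ++ [p.2]

def get_word_pattern (word : String) : String :=
  String.ofList ((PySem.List.enumerate word.toList 0).foldl pvStepA [])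

-- ===== PORT B =====
-- str.maketrans(src, dst): a dict from code point to code point, built pairwise (hand port, exact for equal-length ASCII string arguments)
def pvMakeTrans (src dst : String) : PySem.Dict Int Int :=
  (src.toList.zip dst.toList).foldl (fun d p => d.insert (p.1.toNat : Int) (p.2.toNat : Int)) PySem.Dict.empty

def pvPatTable : PySem.Dict Int Int :=
  pvMakeTrans "abcdefghijklmnopqrstuvwxyzABCDEFGHIJKLMNOPQRSTUVWXYZ0123456789"
    ("aaaaaaaaaaaaaaaaaaaaaaaaaaaaaaaaaaaaaaaaaaaaaaaaaaaaNNNNNNNNNN")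

-- str.translate on one character: table lookup by code point, identity when absent (hand port, exact for a table of valid code points)
def pvTranslateChar (c : Char) : Char :=
  match pvPatTable.get? (c.toNat : Int) with
  | some v => Char.ofNat v.toNat
  | none   => c

-- str.isupper() of the slice word[:1]: True iff it is one uppercase character (hand port, exact on ≤1-char strings)
def pvSliceHeadIsUpper (word : String) : Bool :=
  match PySem.List.slice word.toList none (some 1) with
  | [c] => PySem.Chars.isupper c
  | _   => false

def get_word_pattern_alt (word : String) : String :=
  let body := String.ofList (word.toList.map pvTranslateChar)
  if pvSliceHeadIsUpper word then
    String.ofList ('A' :: PySem.List.slice body.toList (some 1) none)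
  else body

-- ===== PRECONDITION & SPEC =====
def Spec_get_word_pattern (word : String) (out : String) : Prop := out = get_word_pattern_alt word
instance (word : String) (out : String) : Decidable (Spec_get_word_pattern word out) := by unfold Spec_get_word_pattern; infer_instance

-- ===== CLAIM (what is proved, stated in full; the proofs are below) =====
def Claim_equal_get_word_pattern : Prop := ∀ (word : String), Dom_get_word_pattern word → Spec_get_word_pattern word (get_word_pattern word)

-- ===== LEMMAS AND PROOFS =====
-- A's classification of a non-initial character, as a function
def pvClassifyA (c : Char) : Char :=
  if PySem.Chars.isupper c then 'a'
  else if PySem.Chars.islower c then 'a'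
  else if PySem.Chars.isdigit c then 'N'
  else c

lemma pvStepA_ne (pat : List Char) (i : Int) (c : Char) (hi : i ≠ 0) :
    pvStepA pat (i, c) = pat ++ [pvClassifyA c] := by
  unfold pvStepA pvClassifyA
  by_cases hu : PySem.Chars.isupper c <;>
    by_cases hl : PySem.Chars.islower c <;>
      simp [hu, hl, hi]
  split <;> simp

lemma foldA_tail (cs : List Char) (i : Int) (hi : 1 ≤ i) (acc : List Char) :
    (PySem.List.enumerate cs i).foldl pvStepA acc = acc ++ cs.map pvClassifyA := by
  induction cs generalizing i acc with
  | nil => simp [PySem.List.enumerate_nil]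
  | cons c cs ih =>
      rw [PySem.List.enumerate_cons]
      simp only [List.foldl_cons]
      rw [pvStepA_ne _ _ _ (by omega), ih (i + 1) (by omega)]
      simp

-- the table lookup agrees with A's predicate classification on every ASCII character
lemma translate_ascii (n : Nat) (h : n < 128) :
    pvTranslateChar (Char.ofNat n) = pvClassifyA (Char.ofNat n) := by
  revert h; revert n
  set_option maxRecDepth 4096 in decide

lemma translate_dom (c : Char) (h : pvDomChar c = true) :
    pvTranslateChar c = pvClassifyA c := by
  have h128 : c.toNat < 128 := by
    unfold pvDomChar at h
    simp only [Bool.or_eq_true, Bool.and_eq_true, decide_eq_true_eq, beq_iff_eq] at h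
    omega
  have := translate_ascii c.toNat h128
  rwa [Char.ofNat_toNat] at this

lemma map_translate_dom (cs : List Char) (h : cs.all pvDomChar = true) :
    cs.map pvTranslateChar = cs.map pvClassifyA := by
  apply List.map_congr_left
  intro c hc
  exact translate_dom c (by simpa using (List.all_eq_true.mp h c hc))

-- ===== VERDICT (by name: the statement is the Claim_ definition above) =====
theorem get_word_pattern_spec : Claim_equal_get_word_pattern := by
  intro word hdom
  unfold Spec_get_word_pattern get_word_pattern get_word_pattern_alt pvSliceHeadIsUpper
  have hall : word.toList.all pvDomChar = true := hdom
  cases h : word.toList with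
  | nil => simp [PySem.List.enumerate_nil, PySem.List.slice]
  | cons c cs =>
      have hc : pvDomChar c = true := by
        have := List.all_eq_true.mp (h ▸ hall) c (by simp)
        simpa using this
      have hcs : cs.all pvDomChar = true := by
        have := h ▸ hall
        simp only [List.all_cons, Bool.and_eq_true] at this
        exact this.2
      have hslice : PySem.List.slice (c :: cs) none (some 1) = [c] := by
        simp [pysem]
      simp only [hslice, PySem.List.enumerate_cons, List.foldl_cons, List.map_cons]
      rw [foldA_tail cs (0 + 1) (by omega), map_translate_dom cs hcs]
      by_cases hu : PySem.Chars.isupper c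
      · simp only [hu, if_pos]
        simp [PySem.List.slice_from_one, pvStepA, hu]
      · simp only [hu, Bool.false_eq_true, if_false]
        rw [translate_dom c hc]
        unfold pvStepA pvClassifyA
        simp only [hu, Bool.false_eq_true, if_false]
        split <;> [skip; split] <;> simp
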